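-- pv_equiv track=rewrite | github.com/feroz-hub/sbom | app/sources/severity.py | parse_cvss_attack_vector
-- ===== SOURCE A (Python) =====
-- def parse_cvss_attack_vector(vector: str | None) -> str | None:
--     """Extract the AV: component from a CVSS vector string."""
--     if not vector:
--         return None
--     for part in (vector or "").split("/"):
--         if part.startswith("AV:"):
--             return {
--                 "N": "Network",
--                 "A": "Adjacent",
--                 "L": "Local",
--                 "P": "Physical",
--             }.get(part[3:], part[3:])
--     return None
-- ===== SOURCE B (Python) =====
-- def parse_cvss_attack_vector(vector: str | None) -> str | None:
--     """Extract the AV: component from a CVSS vector string."""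
--     if not vector:
--         return None
--     names = {"N": "Network", "A": "Adjacent", "L": "Local", "P": "Physical"}
--     n = len(vector)
--     i = 0
--     while i < n:
--         if (i == 0 or vector[i - 1] == "/") and vector.startswith("AV:", i):
--             j = i + 3
--             while j < n and vector[j] != "/":
--                 j += 1
--             code = vector[i + 3:j]
--             return names.get(code, code)
--         i += 1
--     return None
-- ===== Notes on version B (the rewrite author's own statement) =====
-- stated objective: alternative
-- what changed: Instead of splitting the vector into a list of '/'-separated components and scanning that list for one starting with 'AV:', B scans the raw string once for an 'AV:' occurrence at a component boundary (start or right after '/') and reads the code up to the next '/', allocating no parts list.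
import Mathlib
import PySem

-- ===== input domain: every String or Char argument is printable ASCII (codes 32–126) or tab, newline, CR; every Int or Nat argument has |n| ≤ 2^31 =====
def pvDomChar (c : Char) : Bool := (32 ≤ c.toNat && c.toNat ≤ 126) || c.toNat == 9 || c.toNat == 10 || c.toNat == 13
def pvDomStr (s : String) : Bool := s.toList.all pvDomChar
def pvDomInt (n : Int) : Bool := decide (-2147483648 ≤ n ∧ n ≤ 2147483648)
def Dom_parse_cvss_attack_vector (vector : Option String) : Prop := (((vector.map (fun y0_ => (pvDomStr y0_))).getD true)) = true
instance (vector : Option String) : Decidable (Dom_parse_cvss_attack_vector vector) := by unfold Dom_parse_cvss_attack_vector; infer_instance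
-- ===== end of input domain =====

-- B scans the raw string once for an "AV:" at a component boundary instead of splitting into a parts list; alternative, same cost.


-- the literal dict {"N": "Network", …} both Pythons contain
def pvAvNames : PySem.Dict String String :=
  PySem.Dict.ofList [("N", "Network"), ("A", "Adjacent"), ("L", "Local"), ("P", "Physical")]

-- ===== PORT A =====
-- the for-loop over vector.split("/"): first part starting with "AV:" wins
def pvLoopA : List (List Char) → Option String
  | [] => none
  | p :: rest =>
    if PySem.Chars.startswith p ['A', 'V', ':'] then
      some (pvAvNames.getD (String.ofList (PySem.Chars.slice p (some 3) none))
                          (String.ofList (PySem.Chars.slice p (some 3) none)))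
    else pvLoopA rest

def parse_cvss_attack_vector (vector : Option String) : Option String :=
  match vector with
  | none => none
  | some v => if v = "" then none else pvLoopA (PySem.Chars.splitOn v.toList ['/'])

-- ===== PORT B =====
-- the while-i loop: atB says "i == 0 or vector[i-1] == '/'"; the inner j-loop is the takeWhile
def pvScanB : Bool → List Char → Option String
  | atB, cs =>
    if atB && PySem.Chars.startswith cs ['A', 'V', ':'] then
      let code := String.ofList ((cs.drop 3).takeWhile (fun c => c ≠ '/'))
      some (pvAvNames.getD code code)
    else
      match cs with
      | [] => none
      | c :: r => pvScanB (c == '/') r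

def parse_cvss_attack_vector_alt (vector : Option String) : Option String :=
  match vector with
  | none => none
  | some v => if v = "" then none else pvScanB true v.toList

-- ===== PRECONDITION & SPEC =====
def Spec_parse_cvss_attack_vector (vector : Option String) (out : Option String) : Prop := out = parse_cvss_attack_vector_alt vector
instance (vector : Option String) (out : Option String) : Decidable (Spec_parse_cvss_attack_vector vector out) := by unfold Spec_parse_cvss_attack_vector; infer_instance

-- ===== CLAIM (what is proved, stated in full; the proofs are below) =====
def Claim_equal_parse_cvss_attack_vector : Prop := ∀ (vector : Option String), Dom_parse_cvss_attack_vector vector → Spec_parse_cvss_attack_vector vector (parse_cvss_attack_vector vector)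

-- ===== LEMMAS AND PROOFS =====

-- structural reformulation of str.split("/")
def pvSplit : List Char → List (List Char)
  | [] => [[]]
  | c :: t => if c = '/' then [] :: pvSplit t else (pvSplit t).modifyHead (c :: ·)

theorem pvModifyHead_id {α : Type} (l : List α) : List.modifyHead (fun x => x) l = l := by
  cases l <;> rfl

theorem pvSplit_ne_nil (cs : List Char) : pvSplit cs ≠ [] := by
  induction cs with
  | nil => simp [pvSplit]
  | cons c t ih =>
    simp only [pvSplit]
    split_ifs with h
    · simp
    · cases hh : pvSplit t with
      | nil => exact absurd hh ih
      | cons p ps => simp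

theorem pvSplit_go (fuel : Nat) : ∀ (l cur : List Char) (acc : List (List Char)),
    l.length ≤ fuel →
    PySem.Chars.splitOn.go ['/'] fuel l cur acc
      = acc.reverse ++ (pvSplit l).modifyHead (cur.reverse ++ ·) := by
  induction fuel with
  | zero =>
    intro l cur acc h
    have : l = [] := List.eq_nil_of_length_eq_zero (Nat.le_zero.mp h)
    subst this
    simp [PySem.Chars.splitOn.go, pvSplit]
  | succ n ih =>
    intro l cur acc h
    cases l with
    | nil => simp [PySem.Chars.splitOn.go, pvSplit]
    | cons c rest =>
      by_cases hc : c = '/'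
      · subst hc
        have hpre : List.isPrefixOf ['/'] ('/' :: rest) = true := by
          simp [List.isPrefixOf]
        simp only [PySem.Chars.splitOn.go, hpre, if_true]
        rw [show List.drop (['/'] : List Char).length ('/' :: rest) = rest from rfl]
        rw [ih rest [] ((List.reverse cur) :: acc) (by simpa using Nat.le_of_succ_le_succ h)]
        simp [pvSplit, pvModifyHead_id]
      · have hpre : List.isPrefixOf ['/'] (c :: rest) = false := by
          rw [show (List.isPrefixOf ['/'] (c :: rest)) = ('/' == c && List.isPrefixOf ([] : List Char) rest) from rfl]
          simp [Ne.symm hc]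
        simp only [PySem.Chars.splitOn.go, hpre, Bool.false_eq_true, if_false]
        rw [ih rest (c :: cur) acc (by simpa using Nat.le_of_succ_le_succ h)]
        simp only [pvSplit, hc, if_false]
        obtain ⟨p, ps, hps⟩ : ∃ p ps, pvSplit rest = p :: ps := by
          cases hh : pvSplit rest with
          | nil => exact absurd hh (pvSplit_ne_nil rest)
          | cons p ps => exact ⟨p, ps, rfl⟩
        simp [hps]

theorem pvSplitOn_eq (cs : List Char) : PySem.Chars.splitOn cs ['/'] = pvSplit cs := by
  show PySem.Chars.splitOn.go ['/'] (cs.length + 1) cs [] [] = pvSplit cs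
  rw [pvSplit_go (cs.length + 1) cs [] [] (by omega)]
  obtain ⟨p, ps, hps⟩ : ∃ p ps, pvSplit cs = p :: ps := by
    cases hh : pvSplit cs with
    | nil => exact absurd hh (pvSplit_ne_nil cs)
    | cons p ps => exact ⟨p, ps, rfl⟩
  simp [hps]

theorem pvSplit_no_slash (cs : List Char) (h : '/' ∉ cs) : pvSplit cs = [cs] := by
  induction cs with
  | nil => rfl
  | cons c t ih =>
    have hc : c ≠ '/' := fun hh => h (hh ▸ List.mem_cons_self)
    simp only [pvSplit, hc, if_false]
    rw [ih (fun hm => h (List.mem_cons_of_mem _ hm))]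
    rfl

theorem pvSplit_append_slash (pre post : List Char) (h : '/' ∉ pre) :
    pvSplit (pre ++ '/' :: post) = pre :: pvSplit post := by
  induction pre with
  | nil => simp [pvSplit]
  | cons c t ih =>
    have hc : c ≠ '/' := fun hh => h (hh ▸ List.mem_cons_self)
    simp only [List.cons_append, pvSplit, hc, if_false]
    rw [ih (fun hm => h (List.mem_cons_of_mem _ hm))]
    rfl

theorem pvScanB_false_no_slash (cs : List Char) (h : '/' ∉ cs) : pvScanB false cs = none := by
  induction cs with
  | nil => simp [pvScanB]
  | cons c t ih =>
    have hc : c ≠ '/' := fun hh => h (hh ▸ List.mem_cons_self)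
    simp only [pvScanB, Bool.false_and, Bool.false_eq_true, if_false]
    have : (c == '/') = false := by simpa using hc
    rw [this]
    exact ih (fun hm => h (List.mem_cons_of_mem _ hm))

theorem pvScanB_skip (pre post : List Char) (h : '/' ∉ pre) :
    pvScanB false (pre ++ '/' :: post) = pvScanB true post := by
  induction pre with
  | nil => simp [pvScanB]
  | cons c t ih =>
    have hc : c ≠ '/' := fun hh => h (hh ▸ List.mem_cons_self)
    simp only [List.cons_append, pvScanB, Bool.false_and, Bool.false_eq_true, if_false]
    have : (c == '/') = false := by simpa using hc
    rw [this]
    exact ih (fun hm => h (List.mem_cons_of_mem _ hm))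

theorem pvSplit_head (cs : List Char) : ∃ ps, pvSplit cs = cs.takeWhile (· ≠ '/') :: ps := by
  induction cs with
  | nil => exact ⟨[], rfl⟩
  | cons c t ih =>
    by_cases hc : c = '/'
    · subst hc
      refine ⟨pvSplit t, ?_⟩
      simp [pvSplit, List.takeWhile]
    · obtain ⟨ps, hps⟩ := ih
      refine ⟨ps, ?_⟩
      simp only [pvSplit, hc, if_false, hps]
      have : (decide (c ≠ '/')) = true := by simpa using hc
      simp [List.takeWhile, this]

theorem pvFirstSlash (cs : List Char) (h : '/' ∈ cs) :
    ∃ pre post, cs = pre ++ '/' :: post ∧ '/' ∉ pre := by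
  induction cs with
  | nil => simp at h
  | cons c t ih =>
    by_cases hc : c = '/'
    · exact ⟨[], t, by simp [hc], by simp⟩
    · have ht : '/' ∈ t := by
        rcases List.mem_cons.mp h with h1 | h2
        · exact absurd h1.symm hc
        · exact h2
      obtain ⟨pre, post, h1, h2⟩ := ih ht
      exact ⟨c :: pre, post, by simp [h1], by simp [h2, Ne.symm hc]⟩

theorem pvMain (n : Nat) : ∀ cs : List Char, cs.length ≤ n →
    pvLoopA (pvSplit cs) = pvScanB true cs := by
  induction n with
  | zero =>
    intro cs h
    have : cs = [] := List.eq_nil_of_length_eq_zero (Nat.le_zero.mp h)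
    subst this
    simp [pvSplit, pvLoopA, pvScanB, PySem.Chars.startswith, List.isPrefixOf]
  | succ n ih =>
    intro cs hlen
    by_cases hav : ['A', 'V', ':'] <+: cs
    · -- the string itself starts with "AV:": both return the first component's code
      obtain ⟨t, rfl⟩ := hav
      obtain ⟨ps, hps⟩ := pvSplit_head (['A', 'V', ':'] ++ t)
      have htw : (['A', 'V', ':'] ++ t).takeWhile (· ≠ '/') = 'A' :: 'V' :: ':' :: t.takeWhile (· ≠ '/') := by
        simp [List.takeWhile]
      rw [hps, htw]
      have hsw : PySem.Chars.startswith ('A' :: 'V' :: ':' :: t.takeWhile (· ≠ '/')) ['A', 'V', ':'] = true := by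
        rw [PySem.Chars.startswith_iff]
        exact ⟨t.takeWhile (· ≠ '/'), rfl⟩
      have hswB : PySem.Chars.startswith (['A', 'V', ':'] ++ t) ['A', 'V', ':'] = true := by
        rw [PySem.Chars.startswith_iff]
        exact ⟨t, rfl⟩
      simp only [pvLoopA, hsw, if_true]
      have hsl : PySem.Chars.slice ('A' :: 'V' :: ':' :: t.takeWhile (· ≠ '/')) (some 3) none
          = t.takeWhile (· ≠ '/') := by
        rw [PySem.Chars.slice_eq_listSlice, PySem.List.slice_from _ (by norm_num)]
        rfl
      rw [hsl]
      rfl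
    · -- no "AV:" at the front: the first component does not match; skip it
      by_cases hsl : '/' ∈ cs
      · obtain ⟨pre, post, hpp, hnp⟩ := pvFirstSlash cs hsl
        subst hpp
        rw [pvSplit_append_slash pre post hnp]
        have hpre_nav : PySem.Chars.startswith pre ['A', 'V', ':'] = false := by
          rw [Bool.eq_false_iff]
          intro hc
          rw [PySem.Chars.startswith_iff] at hc
          obtain ⟨u, hu⟩ := hc
          exact hav ⟨u ++ '/' :: post, by rw [← hu]; simp⟩
        simp only [pvLoopA, hpre_nav, Bool.false_eq_true, if_false]
        have hstep : pvScanB true (pre ++ '/' :: post) = pvScanB true post := by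
          have hnsw : PySem.Chars.startswith (pre ++ '/' :: post) ['A', 'V', ':'] = false := by
            rw [Bool.eq_false_iff]
            intro hc
            rw [PySem.Chars.startswith_iff] at hc
            exact hav hc
          cases pre with
          | nil =>
            simp only [List.nil_append, pvScanB]
            rw [List.nil_append] at hnsw
            simp [hnsw]
          | cons c t =>
            have hc : c ≠ '/' := fun hh => hnp (hh ▸ List.mem_cons_self)
            simp only [List.cons_append, pvScanB]
            rw [List.cons_append] at hnsw
            simp only [hnsw, Bool.true_and, Bool.false_eq_true, if_false]
            have hcb : (c == '/') = false := by simpa using hc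
            rw [hcb]
            exact pvScanB_skip t post (fun hm => hnp (List.mem_cons_of_mem _ hm))
        rw [hstep]
        apply ih
        have := hlen
        simp only [List.length_append, List.length_cons] at this
        omega
      · rw [pvSplit_no_slash cs hsl]
        have hnsw : PySem.Chars.startswith cs ['A', 'V', ':'] = false := by
          rw [Bool.eq_false_iff]
          intro hc
          rw [PySem.Chars.startswith_iff] at hc
          exact hav hc
        simp only [pvLoopA, hnsw, Bool.false_eq_true, if_false]
        cases cs with
        | nil => simp [pvScanB, hnsw]
        | cons c t =>
          simp only [pvScanB, hnsw, Bool.true_and, Bool.false_eq_true, if_false]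
          have hc : c ≠ '/' := fun hh => hsl (hh ▸ List.mem_cons_self)
          have hcb : (c == '/') = false := by simpa using hc
          rw [hcb]
          exact (pvScanB_false_no_slash t (fun hm => hsl (List.mem_cons_of_mem _ hm))).symm

-- ===== VERDICT (by name: the statement is the Claim_ definition above) =====
theorem parse_cvss_attack_vector_spec : Claim_equal_parse_cvss_attack_vector := by
  intro vector _
  unfold Spec_parse_cvss_attack_vector parse_cvss_attack_vector parse_cvss_attack_vector_alt
  match vector with
  | none => rfl
  | some v =>
    by_cases hv : v = ""
    · simp [hv]
    · simp only [hv, if_false]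
      rw [pvSplitOn_eq]
      exact pvMain v.toList.length v.toList le_rfl
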